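-- pv_equiv track=rewrite | github.com/shawnp30/neuraldrift.io | backend/services/fix_service.py | _suggest_gpus
-- ===== SOURCE A (Python) =====
-- def _suggest_gpus(target_vram: int) -> list:
--     gpu_map = {
--         8:  ["RTX 3060 8GB", "RTX 4060", "RTX 3070"],
--         10: ["RTX 3080 10GB"],
--         12: ["RTX 3060 12GB", "RTX 4070", "RTX 3080 Ti"],
--         16: ["RTX 4080", "RTX 3080 16GB", "RTX 4080 Super", "RTX 5080"],
--         24: ["RTX 4090", "RTX 3090", "RTX 3090 Ti"],
--         32: ["RTX 5090"],
--     }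
--     # Find the closest tier at or above target
--     for vram_tier in sorted(gpu_map.keys()):
--         if vram_tier >= target_vram:
--             return gpu_map[vram_tier]
--     return gpu_map[32]
-- ===== SOURCE B (Python) =====
-- def _suggest_gpus(target_vram: int) -> list:
--     tiers = [8, 10, 12, 16, 24, 32]
--     gpus = [
--         ["RTX 3060 8GB", "RTX 4060", "RTX 3070"],
--         ["RTX 3080 10GB"],
--         ["RTX 3060 12GB", "RTX 4070", "RTX 3080 Ti"],
--         ["RTX 4080", "RTX 3080 16GB", "RTX 4080 Super", "RTX 5080"],
--         ["RTX 4090", "RTX 3090", "RTX 3090 Ti"],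
--         ["RTX 5090"],
--     ]
--     # binary search: smallest index with tiers[idx] >= target_vram
--     lo, hi = 0, len(tiers)
--     while lo < hi:
--         mid = (lo + hi) // 2
--         if tiers[mid] < target_vram:
--             lo = mid + 1
--         else:
--             hi = mid
--     if lo == len(tiers):  # target above the top tier: clamp to the 32 GB tier
--         lo = len(tiers) - 1
--     return gpus[lo]
-- ===== Notes on version B (the rewrite author's own statement) =====
-- stated objective: alternative
-- what changed: Replaces A's dict-plus-linear scan over sorted keys with a hand-written binary search over a prebuilt sorted tier list (index clamped to the top tier to match A's 32GB fallback).
import Mathlib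
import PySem

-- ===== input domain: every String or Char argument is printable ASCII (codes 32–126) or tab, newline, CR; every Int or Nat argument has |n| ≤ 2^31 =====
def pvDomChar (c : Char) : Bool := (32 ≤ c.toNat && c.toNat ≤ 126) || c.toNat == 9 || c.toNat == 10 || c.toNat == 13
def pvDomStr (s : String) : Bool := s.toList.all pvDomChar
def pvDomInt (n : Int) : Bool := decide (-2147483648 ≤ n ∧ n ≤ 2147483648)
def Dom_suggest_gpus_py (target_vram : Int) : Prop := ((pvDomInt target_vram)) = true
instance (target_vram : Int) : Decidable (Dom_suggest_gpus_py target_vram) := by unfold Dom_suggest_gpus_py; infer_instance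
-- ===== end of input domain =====

-- B replaces A's linear scan over the sorted dict keys by a hand-written binary search
-- over parallel tier/GPU lists (objective: alternative; same tiny constant cost).

-- ===== PORT A =====
-- the gpu_map dict literal, built in insertion order
def pvGpuMap : PySem.Dict Int (List String) :=
  (((((PySem.Dict.empty.insert 8 ["RTX 3060 8GB", "RTX 4060", "RTX 3070"]).insert
      10 ["RTX 3080 10GB"]).insert
      12 ["RTX 3060 12GB", "RTX 4070", "RTX 3080 Ti"]).insert
      16 ["RTX 4080", "RTX 3080 16GB", "RTX 4080 Super", "RTX 5080"]).insert
      24 ["RTX 4090", "RTX 3090", "RTX 3090 Ti"]).insert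
      32 ["RTX 5090"]

-- the 'for vram_tier in sorted(gpu_map.keys())' loop with its early return
-- (gpu_map[vram_tier] is always a present key here, so getD [] is exact)
def pvFindTier (target : Int) : List Int → Option (List String)
  | [] => none
  | k :: rest =>
      if k ≥ target then some (pvGpuMap.getD k []) else pvFindTier target rest

def suggest_gpus_py (target_vram : Int) : List String :=
  match pvFindTier target_vram (PySem.List.sorted pvGpuMap.keys (fun k => k) false) with
  | some r => r
  | none => pvGpuMap.getD 32 []

-- ===== PORT B =====
def pvTiers : List Int := [8, 10, 12, 16, 24, 32]
def pvGpus : List (List String) :=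
  [["RTX 3060 8GB", "RTX 4060", "RTX 3070"],
   ["RTX 3080 10GB"],
   ["RTX 3060 12GB", "RTX 4070", "RTX 3080 Ti"],
   ["RTX 4080", "RTX 3080 16GB", "RTX 4080 Super", "RTX 5080"],
   ["RTX 4090", "RTX 3090", "RTX 3090 Ti"],
   ["RTX 5090"]]

-- the 'while lo < hi' binary-search loop (tiers[mid] is always in range, so getD 0 is exact)
def pvBSearch (target : Int) (lo hi : Nat) : Nat :=
  if lo < hi then
    if pvTiers.getD ((lo + hi) / 2) 0 < target then pvBSearch target ((lo + hi) / 2 + 1) hi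
    else pvBSearch target lo ((lo + hi) / 2)
  else lo
termination_by hi - lo
decreasing_by all_goals omega

def suggest_gpus_py_alt (target_vram : Int) : List String :=
  let lo := pvBSearch target_vram 0 pvTiers.length
  let lo' := if lo = pvTiers.length then pvTiers.length - 1 else lo
  pvGpus.getD lo' []

-- ===== PRECONDITION & SPEC =====
def Spec_suggest_gpus_py (target_vram : Int) (out : List String) : Prop := out = suggest_gpus_py_alt target_vram
instance (target_vram : Int) (out : List String) : Decidable (Spec_suggest_gpus_py target_vram out) := by unfold Spec_suggest_gpus_py; infer_instance

-- ===== CLAIM (what is proved, stated in full; the proofs are below) =====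
def Claim_equal_suggest_gpus_py : Prop := ∀ (target_vram : Int), Dom_suggest_gpus_py target_vram → Spec_suggest_gpus_py target_vram (suggest_gpus_py target_vram)

-- ===== LEMMAS AND PROOFS =====
lemma pvSortedKeys : PySem.List.sorted pvGpuMap.keys (fun k => k) false = [8, 10, 12, 16, 24, 32] := by
  decide

-- ===== VERDICT (by name: the statement is the Claim_ definition above) =====
theorem suggest_gpus_py_spec : Claim_equal_suggest_gpus_py := by
  intro t _
  unfold Spec_suggest_gpus_py suggest_gpus_py suggest_gpus_py_alt
  rw [pvSortedKeys]
  by_cases h8 : t ≤ 8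
  · simp [pvFindTier, pvBSearch, pvTiers, pvGpus, pvGpuMap,
      PySem.Dict.getD_insert,
      show (8:Int) ≥ t by omega, show ¬((16:Int) < t) by omega,
      show ¬((10:Int) < t) by omega, show ¬((8:Int) < t) by omega]
  by_cases h10 : t ≤ 10
  · simp [pvFindTier, pvBSearch, pvTiers, pvGpus, pvGpuMap,
      PySem.Dict.getD_insert,
      show ¬((8:Int) ≥ t) by omega, show (10:Int) ≥ t by omega,
      show ¬((16:Int) < t) by omega, show ¬((10:Int) < t) by omega,
      show (8:Int) < t by omega]
  by_cases h12 : t ≤ 12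
  · simp [pvFindTier, pvBSearch, pvTiers, pvGpus, pvGpuMap,
      PySem.Dict.getD_insert,
      show ¬((8:Int) ≥ t) by omega, show ¬((10:Int) ≥ t) by omega,
      show (12:Int) ≥ t by omega, show ¬((16:Int) < t) by omega,
      show (10:Int) < t by omega, show ¬((12:Int) < t) by omega]
  by_cases h16 : t ≤ 16
  · simp [pvFindTier, pvBSearch, pvTiers, pvGpus, pvGpuMap,
      PySem.Dict.getD_insert,
      show ¬((8:Int) ≥ t) by omega, show ¬((10:Int) ≥ t) by omega,
      show ¬((12:Int) ≥ t) by omega, show (16:Int) ≥ t by omega,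
      show ¬((16:Int) < t) by omega, show (10:Int) < t by omega,
      show (12:Int) < t by omega]
  by_cases h24 : t ≤ 24
  · simp [pvFindTier, pvBSearch, pvTiers, pvGpus, pvGpuMap,
      PySem.Dict.getD_insert,
      show ¬((8:Int) ≥ t) by omega, show ¬((10:Int) ≥ t) by omega,
      show ¬((12:Int) ≥ t) by omega, show ¬((16:Int) ≥ t) by omega,
      show (24:Int) ≥ t by omega, show (16:Int) < t by omega,
      show ¬((24:Int) < t) by omega, show ¬((32:Int) < t) by omega]
  by_cases h32 : t ≤ 32
  · simp [pvFindTier, pvBSearch, pvTiers, pvGpus, pvGpuMap,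
            show ¬((8:Int) ≥ t) by omega, show ¬((10:Int) ≥ t) by omega,
      show ¬((12:Int) ≥ t) by omega, show ¬((16:Int) ≥ t) by omega,
      show ¬((24:Int) ≥ t) by omega, show (32:Int) ≥ t by omega,
      show (16:Int) < t by omega, show (24:Int) < t by omega,
      show ¬((32:Int) < t) by omega]
  · simp [pvFindTier, pvBSearch, pvTiers, pvGpus, pvGpuMap,
      
      show ¬((8:Int) ≥ t) by omega, show ¬((10:Int) ≥ t) by omega,
      show ¬((12:Int) ≥ t) by omega, show ¬((16:Int) ≥ t) by omega,
      show ¬((24:Int) ≥ t) by omega, show ¬((32:Int) ≥ t) by omega,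
      show (16:Int) < t by omega, show (32:Int) < t by omega]
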